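-- pv_equiv track=rewrite | github.com/thomaswmorris/maria | maria/tod/instruments/act/__init__.py | get_therm_label
-- ===== SOURCE A (Python) =====
-- def get_therm_label(tod_id):
--     pa = f"PA{tod_id[-6]}"
--
--     therm_labels = {
--         "Tr2_Arr_AtCF_Ar1": ["PA1", "PA4"],
--         "Tr2_Arr_AtCF_Ar2": ["PA2", "PA5"],
--         "Tr2_Arr_AtCF_Ar3": ["PA3", "PA6", "PA7"],
--     }
--
--     for k, v in therm_labels.items():
--         if pa in v:
--             return k
-- ===== SOURCE B (Python) =====
-- def get_therm_label(tod_id):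
--     c = tod_id[-6]
--     if "1" <= c <= "7":
--         d = int(c)
--         ar = 3 if d == 7 else (d - 1) % 3 + 1
--         return f"Tr2_Arr_AtCF_Ar{ar}"
--     return None
-- ===== Notes on version B (the rewrite author's own statement) =====
-- stated objective: alternative
-- what changed: Replaces A's loop over a thermometer->PA-list dict with an arithmetic closed form: the array number is computed from the digit character as (d-1)%3+1 (with 7 mapping to 3) and the label is built by string formatting; no table or scan remains.
import Mathlib
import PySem

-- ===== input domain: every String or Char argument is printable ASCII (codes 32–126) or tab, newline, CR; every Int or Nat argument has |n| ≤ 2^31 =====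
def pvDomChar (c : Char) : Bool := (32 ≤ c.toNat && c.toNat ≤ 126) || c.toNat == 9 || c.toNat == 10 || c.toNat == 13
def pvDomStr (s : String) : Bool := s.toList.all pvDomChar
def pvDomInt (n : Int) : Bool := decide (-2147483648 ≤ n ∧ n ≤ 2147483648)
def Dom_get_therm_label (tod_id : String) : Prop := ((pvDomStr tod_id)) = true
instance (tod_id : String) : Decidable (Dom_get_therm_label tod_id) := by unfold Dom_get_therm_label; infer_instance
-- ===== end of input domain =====

-- B replaces A's dict scan by an arithmetic closed form on the digit character; equivalence on strings of length ≥ 6.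

-- ===== PORT A =====
-- first key k of the assoc list whose value list contains pa (A's for-loop with early return)
def pvFindTherm (pa : String) : List (String × List String) → Option String
  | [] => none
  | (k, v) :: rest => if pa ∈ v then some k else pvFindTherm pa rest

def get_therm_label (tod_id : String) : Option String :=
  match PySem.Str.pyGet? tod_id (-6) with
  | none => none   -- Python raises IndexError here; excluded by Pre_
  | some c =>
    let pa := "PA" ++ String.singleton c
    pvFindTherm pa
      [("Tr2_Arr_AtCF_Ar1", ["PA1", "PA4"]),
       ("Tr2_Arr_AtCF_Ar2", ["PA2", "PA5"]),
       ("Tr2_Arr_AtCF_Ar3", ["PA3", "PA6", "PA7"])]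

-- ===== PORT B =====
def get_therm_label_alt (tod_id : String) : Option String :=
  match PySem.Str.pyGet? tod_id (-6) with
  | none => none   -- Python raises IndexError here; excluded by Pre_
  | some c =>
    if '1' ≤ c ∧ c ≤ '7' then
      -- int(c) for a single digit character: exact as c.toNat - 48 here
      let d : Int := (c.toNat : Int) - 48
      let ar : Int := if d = 7 then 3 else PySem.Int.mod (d - 1) 3 + 1
      some ("Tr2_Arr_AtCF_Ar" ++ PySem.Int.toStr ar)
    else none

-- ===== PRECONDITION & SPEC =====
-- A (and B) raise IndexError on tod_id[-6] when the string is shorter than 6 characters.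
def Pre_get_therm_label (tod_id : String) : Prop := 6 ≤ (PySem.Str.len tod_id)
instance (tod_id : String) : Decidable (Pre_get_therm_label tod_id) := by unfold Pre_get_therm_label; infer_instance
def pvWitness_get_therm_label : String := "xx2yyyyy"

def Spec_get_therm_label (tod_id : String) (out : Option String) : Prop := out = get_therm_label_alt tod_id
instance (tod_id : String) (out : Option String) : Decidable (Spec_get_therm_label tod_id out) := by unfold Spec_get_therm_label; infer_instance

-- ===== CLAIM (what is proved, stated in full; the proofs are below) =====
def Claim_equal_get_therm_label : Prop := ∀ (tod_id : String), Dom_get_therm_label tod_id → Pre_get_therm_label tod_id → Spec_get_therm_label tod_id (get_therm_label tod_id)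

-- ===== LEMMAS AND PROOFS =====
lemma pv_char_eq_of_toNat (c : Char) (n : Nat) (h : c.toNat = n) : c = Char.ofNat n := by
  subst h; exact (Char.ofNat_toNat c).symm

lemma pv_branches_eq (c : Char) :
    pvFindTherm ("PA" ++ String.singleton c)
      [("Tr2_Arr_AtCF_Ar1", ["PA1", "PA4"]),
       ("Tr2_Arr_AtCF_Ar2", ["PA2", "PA5"]),
       ("Tr2_Arr_AtCF_Ar3", ["PA3", "PA6", "PA7"])] =
    (if '1' ≤ c ∧ c ≤ '7' then
      let d : Int := (c.toNat : Int) - 48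
      let ar : Int := if d = 7 then 3 else PySem.Int.mod (d - 1) 3 + 1
      some ("Tr2_Arr_AtCF_Ar" ++ PySem.Int.toStr ar)
    else none) := by
  by_cases h17 : '1' ≤ c ∧ c ≤ '7'
  · -- c is one of '1'..'7'
    obtain ⟨h1, h7⟩ := h17
    have hlo : 49 ≤ c.toNat := h1
    have hhi : c.toNat ≤ 55 := h7
    interval_cases h : c.toNat <;>
      (have hc := pv_char_eq_of_toNat c _ h; subst hc; decide)
  · -- c is none of them: pa matches no list entry
    rw [if_neg h17]
    have h1 : c ≠ '1' := by rintro rfl; exact h17 ⟨by decide, by decide⟩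
    have h2 : c ≠ '2' := by rintro rfl; exact h17 ⟨by decide, by decide⟩
    have h3 : c ≠ '3' := by rintro rfl; exact h17 ⟨by decide, by decide⟩
    have h4 : c ≠ '4' := by rintro rfl; exact h17 ⟨by decide, by decide⟩
    have h5 : c ≠ '5' := by rintro rfl; exact h17 ⟨by decide, by decide⟩
    have h6 : c ≠ '6' := by rintro rfl; exact h17 ⟨by decide, by decide⟩
    have h7 : c ≠ '7' := by rintro rfl; exact h17 ⟨by decide, by decide⟩
    have hne : ∀ d : Char, c ≠ d → "PA" ++ String.singleton c ≠ "PA" ++ String.singleton d := by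
      intro d hd hcontra
      apply hd
      have := congrArg String.toList hcontra
      simpa [String.singleton] using this
    have e1 : ("PA" ++ String.singleton c) ≠ "PA1" := hne '1' h1
    have e2 : ("PA" ++ String.singleton c) ≠ "PA2" := hne '2' h2
    have e3 : ("PA" ++ String.singleton c) ≠ "PA3" := hne '3' h3
    have e4 : ("PA" ++ String.singleton c) ≠ "PA4" := hne '4' h4
    have e5 : ("PA" ++ String.singleton c) ≠ "PA5" := hne '5' h5
    have e6 : ("PA" ++ String.singleton c) ≠ "PA6" := hne '6' h6
    have e7 : ("PA" ++ String.singleton c) ≠ "PA7" := hne '7' h7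
    simp only [pvFindTherm, List.mem_cons, List.not_mem_nil, or_false]
    rw [if_neg (by push Not; exact ⟨e1, e4⟩),
        if_neg (by push Not; exact ⟨e2, e5⟩),
        if_neg (by push Not; exact ⟨e3, e6, e7⟩)]

-- ===== VERDICT (by name: the statement is the Claim_ definition above) =====
theorem get_therm_label_spec : Claim_equal_get_therm_label := by
  intro tod_id _ _
  unfold Spec_get_therm_label get_therm_label get_therm_label_alt
  cases PySem.Str.pyGet? tod_id (-6) with
  | none => rfl
  | some c => exact pv_branches_eq c
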